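-- pv_equiv track=rewrite | github.com/chrlie/shorten | shorten/keygens.py | bx_encode
-- ===== SOURCE A (Python) =====
-- def bx_encode(n, alphabet):
--   """\
--   Encodes an integer ``n`` as a string by mapping it to the 0-indexed iterable ``alphabet``.
--   """
--
--   b = len(alphabet)
--
--   if n == 0:
--     return alphabet[0]
--   else:
--     digits = []
--     while n > 0:
--       digits.append(alphabet[n % b])
--       n = n // b
--     digits.reverse()
--     return ''.join(digits)
-- ===== SOURCE B (Python) =====
-- def bx_encode(n, alphabet):
--   """\
--   Encodes an integer ``n`` as a string by mapping it to the 0-indexed iterable ``alphabet``.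
--   """
--
--   b = len(alphabet)
--
--   if n == 0:
--     return alphabet[0]
--
--   # count the digits of n in base b: d = smallest d with b**d > n
--   d = 0
--   p = 1
--   while p <= n:
--     d += 1
--     p *= b
--
--   # emit most-significant digit first by indexing with powers of b
--   return ''.join(alphabet[(n // b ** i) % b] for i in range(d - 1, -1, -1))
-- ===== Notes on version B (the rewrite author's own statement) =====
-- stated objective: alternative
-- what changed: Replaces A's least-significant-first digit loop with append+reverse+join by first counting the digits d with a power accumulator and then emitting the digits most-significant-first directly via alphabet[(n // b**i) % b] for i = d-1..0, so no digit list is ever reversed.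
import Mathlib
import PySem

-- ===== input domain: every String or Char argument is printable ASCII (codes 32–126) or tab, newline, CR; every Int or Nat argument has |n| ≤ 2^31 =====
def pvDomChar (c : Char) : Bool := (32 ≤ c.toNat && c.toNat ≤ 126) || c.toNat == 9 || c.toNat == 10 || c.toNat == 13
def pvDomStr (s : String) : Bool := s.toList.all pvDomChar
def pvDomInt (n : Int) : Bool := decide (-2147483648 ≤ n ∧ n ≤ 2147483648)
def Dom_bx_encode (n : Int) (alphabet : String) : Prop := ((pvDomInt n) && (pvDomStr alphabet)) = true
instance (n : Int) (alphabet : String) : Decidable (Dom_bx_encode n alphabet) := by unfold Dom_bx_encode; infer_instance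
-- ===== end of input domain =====

-- B replaces A's least-significant-first digit loop (append, reverse, join) with a digit
-- count followed by emitting the digits most-significant-first via powers of the base.


-- ===== PORT A =====
-- the 'while n > 0' loop: appends alphabet[n % b] then n = n // b.  'fuel' only makes the
-- recursion total; fuel = n.toNat + 1 suffices on Pre_ (there 2 ≤ b, so n strictly decreases).
-- alphabet[i] is ported as (pyGet? …).getD ' '; on Pre_ the index is always in range (some _).
def bx_encode_loop (b : Int) (alphabet : String) : Nat → Int → List Char → List Char
  | 0, _, digits => digits
  | fuel + 1, n, digits =>
      if 0 < n then
        bx_encode_loop b alphabet fuel (PySem.Int.floordiv n b)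
          (digits ++ [(PySem.Str.pyGet? alphabet (PySem.Int.mod n b)).getD ' '])
      else digits

def bx_encode (n : Int) (alphabet : String) : String :=
  let b : Int := PySem.Str.len alphabet
  if n = 0 then
    String.ofList [(PySem.Str.pyGet? alphabet 0).getD ' ']
  else
    String.ofList (bx_encode_loop b alphabet (n.toNat + 1) n []).reverse

-- ===== PORT B =====
-- the 'while p <= n: d += 1; p *= b' digit-count loop; fuel = n.toNat + 1 suffices on Pre_
-- (there 2 ≤ b, so p at least doubles each step).
def bx_count (b : Int) : Nat → Int → Int → Nat → Nat
  | 0, _, _, d => d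
  | fuel + 1, n, p, d => if p ≤ n then bx_count b fuel n (p * b) (d + 1) else d

-- ''.join(alphabet[(n // b ** i) % b] for i in range(d - 1, -1, -1)); every i the range
-- yields is ≥ 0, so Python's b ** i is exactly b ^ i.toNat there.
def bx_encode_alt (n : Int) (alphabet : String) : String :=
  let b : Int := PySem.Str.len alphabet
  if n = 0 then
    String.ofList [(PySem.Str.pyGet? alphabet 0).getD ' ']
  else
    let d : Nat := bx_count b (n.toNat + 1) n 1 0
    String.ofList ((PySem.List.pyRange ((d : Int) - 1) (-1) (-1)).map
      (fun i => (PySem.Str.pyGet? alphabet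
        (PySem.Int.mod (PySem.Int.floordiv n (b ^ i.toNat)) b)).getD ' '))

-- ===== PRECONDITION & SPEC =====
-- A raises IndexError when n == 0 with alphabet = '', raises ZeroDivisionError when n > 0 with
-- alphabet = '', and loops forever when n > 0 with len(alphabet) == 1 (n // 1 == n); exactly those are excluded.
def Pre_bx_encode (n : Int) (alphabet : String) : Prop :=
  (n = 0 → 1 ≤ alphabet.toList.length) ∧ (0 < n → 2 ≤ alphabet.toList.length)
instance (n : Int) (alphabet : String) : Decidable (Pre_bx_encode n alphabet) := by
  unfold Pre_bx_encode; infer_instance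
def pvWitness_bx_encode : Int × String := (5, "ab")

def Spec_bx_encode (n : Int) (alphabet : String) (out : String) : Prop := out = bx_encode_alt n alphabet
instance (n : Int) (alphabet : String) (out : String) : Decidable (Spec_bx_encode n alphabet out) := by unfold Spec_bx_encode; infer_instance

-- ===== CLAIM (what is proved, stated in full; the proofs are below) =====
def Claim_equal_bx_encode : Prop := ∀ (n : Int) (alphabet : String), Dom_bx_encode n alphabet → Pre_bx_encode n alphabet → Spec_bx_encode n alphabet (bx_encode n alphabet)

-- ===== LEMMAS AND PROOFS =====

-- n // b shrinks (used for pvCanon's termination)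
theorem pv_ediv_lt (n b : Int) (h : 0 < n) (hb : 2 ≤ b) : n / b < n := by
  apply Int.ediv_lt_of_lt_mul (by omega)
  nlinarith

-- canonical digit list, MSB first: the common value both ports compute
def pvCanon (b : Int) (alphabet : String) (n : Int) : List Char :=
  if hc : 0 < n ∧ 2 ≤ b then
    pvCanon b alphabet (PySem.Int.floordiv n b)
      ++ [(PySem.Str.pyGet? alphabet (PySem.Int.mod n b)).getD ' ']
  else []
termination_by n.toNat
decreasing_by
  have hb : (0:Int) < b := by omega
  have h1 : PySem.Int.floordiv n b = n / b := PySem.Int.floordiv_eq_ediv_of_pos hb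
  have h2 : n / b < n := pv_ediv_lt n b hc.1 hc.2
  have h4 : 0 ≤ n / b := Int.ediv_nonneg (by omega) (by omega)
  rw [h1]; omega

theorem pvCanon_neg (b : Int) (alphabet : String) (n : Int) (h : ¬ 0 < n) :
    pvCanon b alphabet n = [] := by
  rw [pvCanon]; simp [h]

-- ---- A's loop equals pvCanon ----
theorem bx_loop_acc (b : Int) (alphabet : String) :
    ∀ (fuel : Nat) (n : Int) (digits : List Char),
      bx_encode_loop b alphabet fuel n digits = digits ++ bx_encode_loop b alphabet fuel n [] := by
  intro fuel
  induction fuel with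
  | zero => intro n digits; simp [bx_encode_loop]
  | succ f ih =>
    intro n digits
    simp only [bx_encode_loop]
    split
    · rw [ih _ (digits ++ _), ih _ ([] ++ _)]; simp
    · simp

theorem bx_loop_eq_canon (b : Int) (alphabet : String) (hb : 2 ≤ b) :
    ∀ (fuel : Nat) (n : Int), n.toNat < fuel →
      (bx_encode_loop b alphabet fuel n []).reverse = pvCanon b alphabet n := by
  intro fuel
  induction fuel with
  | zero => omega
  | succ f ih =>
    intro n hn
    by_cases h : 0 < n
    · have hdiv : PySem.Int.floordiv n b = n / b :=
        PySem.Int.floordiv_eq_ediv_of_pos (by omega)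
      have h2 : n / b < n := pv_ediv_lt n b h hb
      have h3 : 0 ≤ n / b := Int.ediv_nonneg (by omega) (by omega)
      simp only [bx_encode_loop, if_pos h]
      rw [bx_loop_acc, List.reverse_append]
      rw [ih _ (by rw [hdiv]; omega)]
      conv_rhs => rw [pvCanon]
      rw [dif_pos ⟨h, hb⟩, hdiv]
      simp
    · simp [bx_encode_loop, h, pvCanon_neg b alphabet n h]

-- ---- characterisation of B's digit count ----
theorem bx_count_of_lt (b : Int) : ∀ (fuel : Nat) (n p : Int) (d : Nat),
    n < p → bx_count b fuel n p d = d := by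
  intro fuel
  cases fuel with
  | zero => intro n p d _; rfl
  | succ f => intro n p d h; simp only [bx_count]; rw [if_neg (by omega)]

theorem bx_count_bounds (b : Int) (hb : 2 ≤ b) :
    ∀ (fuel : Nat) (n p : Int) (d : Nat), 0 < p → p ≤ n → n < p * b ^ fuel →
      d < bx_count b fuel n p d ∧
      p * b ^ (bx_count b fuel n p d - d - 1) ≤ n ∧
      n < p * b ^ (bx_count b fuel n p d - d) := by
  intro fuel
  induction fuel with
  | zero => intro n p d hp hpn hlt; simp at hlt; omega
  | succ f ih =>
    intro n p d hp hpn hlt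
    simp only [bx_count, if_pos hpn]
    by_cases h : p * b ≤ n
    · have hpb : 0 < p * b := by positivity
      have hlt' : n < p * b * b ^ f := by
        rw [mul_assoc, ← pow_succ']; exact hlt
      obtain ⟨h1, h2, h3⟩ := ih n (p * b) (d + 1) hpb h hlt'
      refine ⟨by omega, ?_, ?_⟩
      · have e : bx_count b f n (p*b) (d+1) - d - 1 = (bx_count b f n (p*b) (d+1) - (d+1) - 1) + 1 := by omega
        rw [e, pow_succ']
        calc p * (b * b ^ (bx_count b f n (p*b) (d+1) - (d+1) - 1))
            = p * b * b ^ (bx_count b f n (p*b) (d+1) - (d+1) - 1) := by ring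
          _ ≤ n := h2
      · have e : bx_count b f n (p*b) (d+1) - d = (bx_count b f n (p*b) (d+1) - (d+1)) + 1 := by omega
        rw [e, pow_succ']
        calc n < p * b * b ^ (bx_count b f n (p*b) (d+1) - (d+1)) := h3
          _ = p * (b * b ^ (bx_count b f n (p*b) (d+1) - (d+1))) := by ring
    · rw [bx_count_of_lt b f n (p * b) (d + 1) (by omega)]
      refine ⟨by omega, ?_, ?_⟩
      · simpa using hpn
      · simpa [pow_one] using (by omega : n < p * b)

-- d with b^(d-1) ≤ n < b^d (d ≥ 1) is unique
theorem digits_unique (b : Int) (hb : 2 ≤ b) (n : Int) (d1 d2 : Nat)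
    (h1 : 1 ≤ d1) (h1a : b ^ (d1 - 1) ≤ n) (h1b : n < b ^ d1)
    (h2 : 1 ≤ d2) (h2a : b ^ (d2 - 1) ≤ n) (h2b : n < b ^ d2) : d1 = d2 := by
  have hb1 : (1:Int) < b := by omega
  have k1 : b ^ (d1 - 1) < b ^ d2 := lt_of_le_of_lt h1a h2b
  have k2 : b ^ (d2 - 1) < b ^ d1 := lt_of_le_of_lt h2a h1b
  have m1 : d1 - 1 < d2 := (pow_lt_pow_iff_right₀ hb1).mp k1
  have m2 : d2 - 1 < d1 := (pow_lt_pow_iff_right₀ hb1).mp k2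
  omega

theorem n_lt_pow (b : Int) (hb : 2 ≤ b) (n : Int) : n < b ^ (n.toNat + 1) := by
  have h2 : (2:Int) ^ (n.toNat + 1) ≤ b ^ (n.toNat + 1) :=
    pow_le_pow_left₀ (by omega) hb _
  have h1 : (n.toNat : Int) < 2 ^ (n.toNat + 1) := by
    have := Nat.lt_two_pow_self (n := n.toNat)
    have h3 : (2:Nat) ^ n.toNat ≤ 2 ^ (n.toNat + 1) := Nat.pow_le_pow_right (by omega) (by omega)
    exact_mod_cast by omega
  by_cases hn : 0 ≤ n
  · calc n = (n.toNat : Int) := by omega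
      _ < 2 ^ (n.toNat + 1) := h1
      _ ≤ b ^ (n.toNat + 1) := h2
  · calc n < 0 := by omega
      _ < b ^ (n.toNat + 1) := by positivity

-- the count with its standard fuel: exactly the number of base-b digits of n
theorem bx_count_spec (b : Int) (hb : 2 ≤ b) (n : Int) (hn : 0 < n) :
    1 ≤ bx_count b (n.toNat + 1) n 1 0 ∧
    b ^ (bx_count b (n.toNat + 1) n 1 0 - 1) ≤ n ∧
    n < b ^ (bx_count b (n.toNat + 1) n 1 0) := by
  have := bx_count_bounds b hb (n.toNat + 1) n 1 0 (by omega) (by omega)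
    (by simpa using n_lt_pow b hb n)
  simpa using this

-- ---- B's mapped countdown range equals pvCanon ----
theorem bx_alt_list_eq_canon (b : Int) (alphabet : String) (hb : 2 ≤ b) :
    ∀ (m : Nat) (n : Int), n.toNat ≤ m →
      ((PySem.List.pyRange ((bx_count b (n.toNat + 1) n 1 0 : Int) - 1) (-1) (-1)).map
        (fun i => (PySem.Str.pyGet? alphabet
          (PySem.Int.mod (PySem.Int.floordiv n (b ^ i.toNat)) b)).getD ' '))
      = pvCanon b alphabet n := by
  intro m
  induction m with
  | zero =>
    intro n hn
    have h0 : ¬ 0 < n := by omega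
    rw [bx_count_of_lt b _ n 1 0 (by omega)]
    simp [pvCanon_neg b alphabet n h0]
  | succ m ih =>
    intro n hn
    by_cases h : 0 < n
    · obtain ⟨hd1, hdl, hdu⟩ := bx_count_spec b hb n h
      set d := bx_count b (n.toNat + 1) n 1 0 with hd
      have hdiv : PySem.Int.floordiv n b = n / b :=
        PySem.Int.floordiv_eq_ediv_of_pos (by omega)
      have hnb_lt : n / b < n := pv_ediv_lt n b h hb
      have hnb_nn : 0 ≤ n / b := Int.ediv_nonneg (by omega) (by omega)
      rw [pvCanon]; rw [dif_pos ⟨h, hb⟩, hdiv]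
      by_cases hnb : 0 < n / b
      · -- n >= b: d >= 2, count (n/b) = d - 1; peel off digit i = 0 at the end
        have hble : b ≤ n := by
          by_contra hc
          have : n / b = 0 := Int.ediv_eq_zero_of_lt (by omega) (by omega)
          omega
        have hd2 : 2 ≤ d := by
          by_contra hc
          have hde : d = 1 := by omega
          rw [hde] at hdu; simp at hdu; omega
        obtain ⟨hd1', hdl', hdu'⟩ := bx_count_spec b hb (n / b) hnb
        set d' := bx_count b ((n / b).toNat + 1) (n / b) 1 0 with hd'
        have bl : b ^ (d - 2) ≤ n / b := by
          rw [Int.le_ediv_iff_mul_le (by omega : (0:Int) < b)]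
          calc b ^ (d - 2) * b = b ^ (d - 1) := by
                rw [← pow_succ]; congr 1; omega
            _ ≤ n := hdl
        have bu : n / b < b ^ (d - 1) := by
          rw [Int.ediv_lt_iff_lt_mul (by omega : (0:Int) < b)]
          calc n < b ^ d := hdu
            _ = b ^ (d - 1) * b := by rw [← pow_succ]; congr 1; omega
        have hdd : d' = d - 1 :=
          digits_unique b hb (n / b) d' (d - 1) hd1' hdl' hdu' (by omega)
            ((by omega : d - 2 = d - 1 - 1) ▸ bl) bu
        have hrec := ih (n / b) (by omega)
        rw [← hd'] at hrec
        rw [hdd] at hrec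
        -- both countdown ranges as reversed ascending ranges
        rw [PySem.List.pyRange_neg_one_eq_reverse, show (-1:Int) + 1 = 0 by ring]
        rw [PySem.List.pyRange_neg_one_eq_reverse, show (-1:Int) + 1 = 0 by ring] at hrec
        -- peel index 0 from the front of the ascending range (= last digit emitted)
        rw [PySem.List.pyRange_one_cons (by omega : (0:Int) < (d:Int) - 1 + 1)]
        rw [List.reverse_cons, List.map_append]
        congr 1
        · -- the remaining digits i = d-1 .. 1 of n are the digits i = d-2 .. 0 of n/b
          rw [← hrec]
          rw [PySem.List.pyRange_one, PySem.List.pyRange_one]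
          rw [show ((d:Int) - 1 + 1 - (0 + 1)).toNat = d - 1 by omega]
          rw [show (((d - 1 : Nat) : Int) - 1 + 1 - 0).toNat = d - 1 by omega]
          rw [← List.map_reverse, ← List.map_reverse, List.map_map, List.map_map]
          refine List.map_congr_left ?_
          intro k hk
          simp only [List.mem_reverse, List.mem_range] at hk
          simp only [Function.comp]
          congr 2
          rw [show ((0:Int) + 1 + (k:Int)).toNat = k + 1 by omega,
            show ((0:Int) + (k:Int)).toNat = k by omega]
          rw [PySem.Int.floordiv_eq_ediv_of_pos (by positivity : (0:Int) < b ^ (k+1)),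
            PySem.Int.floordiv_eq_ediv_of_pos (by positivity : (0:Int) < b ^ k)]
          rw [pow_succ']
          rw [← Int.ediv_ediv_of_nonneg (by omega : (0:Int) ≤ b)]
        · -- the peeled element is digit i = 0: alphabet[n % b]
          simp
      · -- 1 ≤ n < b: d = 1, single digit n % b
        have hnb0 : n / b = 0 := by omega
        have hnlt : n < b := by
          have h1 := Int.emod_lt_of_pos n (by omega : (0:Int) < b)
          have h2 := Int.mul_ediv_add_emod n b
          rw [hnb0] at h2
          simp at h2
          omega
        have hde : d = 1 := by
          by_contra hc
          have hge : b ≤ b ^ (d - 1) := by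
            calc b = b ^ 1 := (pow_one b).symm
              _ ≤ b ^ (d - 1) := pow_le_pow_right₀ (by omega) (by omega)
          have hcontra : b < b := lt_of_le_of_lt (le_trans hge hdl) hnlt
          exact absurd hcontra (lt_irrefl b)
        rw [hde]
        rw [show ((1:Nat) : Int) - 1 = 0 by norm_num]
        rw [PySem.List.pyRange_neg_one_cons (by omega : (-1:Int) < 0)]
        rw [PySem.List.pyRange_neg_one_eq_nil (by omega : (0:Int) - 1 ≤ -1)]
        rw [pvCanon_neg b alphabet (n / b) (by omega)]
        simp
    · rw [bx_count_of_lt b _ n 1 0 (by omega)]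
      simp [pvCanon_neg b alphabet n h]

-- ===== VERDICT (by name: the statement is the Claim_ definition above) =====
theorem bx_encode_spec : Claim_equal_bx_encode := by
  intro n alphabet _ hpre
  unfold Spec_bx_encode bx_encode bx_encode_alt
  by_cases h0 : n = 0
  · simp [h0]
  · simp only [if_neg h0]
    by_cases hpos : 0 < n
    · have hb : 2 ≤ PySem.Str.len alphabet := by
        have h1 := hpre.2 hpos
        rw [PySem.Str.len_eq]
        have h2 := String.length_toList (s := alphabet)
        omega
      rw [bx_loop_eq_canon _ _ hb _ _ (by omega),
        bx_alt_list_eq_canon _ _ hb n.toNat n (le_refl _)]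
    · -- n < 0: both sides are the empty string
      have hfuel : n.toNat + 1 = 1 := by omega
      rw [hfuel]
      rw [bx_count_of_lt _ _ _ _ _ (by omega)]
      simp [bx_encode_loop, hpos]
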